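-- pv_equiv track=rewrite | github.com/RockDard/ScanForge | qa_portal/tooling.py | _normalize_apt_source_line
-- ===== SOURCE A (Python) =====
-- def _normalize_apt_source_line(line: str) -> str:
--     parts = line.split()
--     if len(parts) >= 2 and parts[1].startswith("["):
--         while len(parts) > 1 and not parts[1].endswith("]"):
--             parts.pop(1)
--         if len(parts) > 1:
--             parts.pop(1)
--     return " ".join(parts[:4]).casefold()
-- ===== SOURCE B (Python) =====
-- def _normalize_apt_source_line(line: str) -> str:
--     parts = line.split()
--     if len(parts) >= 2 and parts[1].startswith("["):
--         closing = next((i for i in range(1, len(parts)) if parts[i].endswith("]")), None)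
--         parts = parts[:1] + parts[closing + 1:] if closing is not None else parts[:1]
--     return " ".join(parts[:4]).casefold()
-- ===== Notes on version B (the rewrite author's own statement) =====
-- stated objective: simpler
-- what changed: Replaces the in-place repeated pop(1) mutation loop with a single forward scan for the first token that closes the bracket group, followed by one slice-based rebuild of the token list.
import Mathlib
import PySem

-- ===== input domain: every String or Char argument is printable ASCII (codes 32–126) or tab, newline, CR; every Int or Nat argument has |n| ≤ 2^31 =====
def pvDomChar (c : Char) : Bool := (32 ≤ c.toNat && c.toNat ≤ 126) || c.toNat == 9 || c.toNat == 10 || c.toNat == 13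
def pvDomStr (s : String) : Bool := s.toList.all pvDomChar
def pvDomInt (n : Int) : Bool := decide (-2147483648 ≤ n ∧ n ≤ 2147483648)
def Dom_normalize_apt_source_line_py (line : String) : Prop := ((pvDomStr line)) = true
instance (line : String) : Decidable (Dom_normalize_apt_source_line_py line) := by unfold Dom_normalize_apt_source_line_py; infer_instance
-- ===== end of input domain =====

-- B replaces A's repeated in-place pop(1) loop by one forward scan for the first ']'-terminated
-- token plus a single slice-based rebuild (objective: simpler). casefold = lower on the ASCII domain.

-- ===== PORT A =====
-- the while loop: 'while len(parts) > 1 and not parts[1].endswith("]"): parts.pop(1)'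
def pvAWhile : List String → List String
  | p0 :: p1 :: rest =>
      if ¬ (PySem.Str.endswith p1 "]") then pvAWhile (p0 :: rest) else p0 :: p1 :: rest
  | parts => parts

def normalize_apt_source_line_py (line : String) : String :=
  let parts := PySem.Str.split₀ line
  let parts :=
    match parts with
    | p0 :: p1 :: rest =>
        if PySem.Str.startswith p1 "[" then
          let parts' := pvAWhile (p0 :: p1 :: rest)
          -- 'if len(parts) > 1: parts.pop(1)'
          match parts' with
          | q0 :: _ :: qs => q0 :: qs
          | other => other
        else p0 :: p1 :: rest
    | other => other
  PySem.Str.lower (PySem.Str.join " " (parts.take 4))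

-- ===== PORT B =====
def normalize_apt_source_line_py_alt (line : String) : String :=
  let parts := PySem.Str.split₀ line
  let parts :=
    match parts with
    | p0 :: p1 :: rest =>
        if PySem.Str.startswith p1 "[" then
          -- closing = first index ≥ 1 whose token ends with "]" (None if absent)
          match (p1 :: rest).findIdx? (fun t => PySem.Str.endswith t "]") with
          | some k => [p0] ++ (p1 :: rest).drop (k + 1)   -- parts[:1] + parts[closing+1:]
          | none => [p0]                                   -- parts[:1]
        else p0 :: p1 :: rest
    | other => other
  PySem.Str.lower (PySem.Str.join " " (parts.take 4))

-- ===== PRECONDITION & SPEC =====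
def Spec_normalize_apt_source_line_py (line : String) (out : String) : Prop := out = normalize_apt_source_line_py_alt line
instance (line : String) (out : String) : Decidable (Spec_normalize_apt_source_line_py line out) := by unfold Spec_normalize_apt_source_line_py; infer_instance

-- ===== CLAIM (what is proved, stated in full; the proofs are below) =====
def Claim_equal_normalize_apt_source_line_py : Prop := ∀ (line : String), Dom_normalize_apt_source_line_py line → Spec_normalize_apt_source_line_py line (normalize_apt_source_line_py line)

-- ===== LEMMAS AND PROOFS =====

-- A's while-then-pop over p0 :: l equals B's findIdx?-then-slice over the same tokens.
theorem pvAWhile_pop_eq (p0 : String) (l : List String) :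
    (match pvAWhile (p0 :: l) with
     | q0 :: _ :: qs => q0 :: qs
     | other => other) =
    (match l.findIdx? (fun t => PySem.Str.endswith t "]") with
     | some k => [p0] ++ l.drop (k + 1)
     | none => [p0]) := by
  induction l with
  | nil => simp [pvAWhile, List.findIdx?, List.findIdx?.go]
  | cons p1 rest ih =>
      simp only [pvAWhile]
      rw [List.findIdx?_cons]
      by_cases h : PySem.Str.endswith p1 "]" = true
      · rw [if_neg (fun hc => hc h), h]
        rfl
      · rw [if_pos h, ih, Bool.eq_false_iff.mpr h]
        cases hf : rest.findIdx? (fun t => PySem.Str.endswith t "]") with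
        | none => simp
        | some k => simp

-- ===== VERDICT (by name: the statement is the Claim_ definition above) =====
theorem normalize_apt_source_line_py_spec : Claim_equal_normalize_apt_source_line_py := by
  unfold Claim_equal_normalize_apt_source_line_py
  intro line _
  unfold Spec_normalize_apt_source_line_py normalize_apt_source_line_py normalize_apt_source_line_py_alt
  cases hp : PySem.Str.split₀ line with
  | nil => rfl
  | cons p0 t =>
      cases t with
      | nil => rfl
      | cons p1 rest =>
          by_cases hs : PySem.Str.startswith p1 "[" = true
          · simp only [hs, if_pos]
            rw [pvAWhile_pop_eq p0 (p1 :: rest)]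
          · simp only [if_neg hs]
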